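-- pv_equiv track=rewrite | github.com/aaPanel/BaoTa | class/public.py | xsssec3
-- ===== SOURCE A (Python) =====
-- def xsssec3(text):
--     '''
--         @name XSS防御，只替换关键字符，不转义字符
--         @author hwliang
--         @param text 要转义的字符
--         @return str
--     '''
--     sub_list = {
--         '<': '＜',
--         '>': '＞',
--         '"': '＂',
--         "'": '＇'
--     }
--     for s in sub_list.keys():
--         text = text.replace(s, sub_list[s])
--     return text
-- ===== SOURCE B (Python) =====
-- def xsssec3(text):
--     '''
--         @name XSS防御，只替换关键字符，不转义字符
--         @author hwliang
--         @param text 要转义的字符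
--         @return str
--     '''
--     sub_list = {
--         '<': '＜',
--         '>': '＞',
--         '"': '＂',
--         "'": '＇'
--     }
--     return ''.join(sub_list.get(c, c) for c in text)
-- ===== Notes on version B (the rewrite author's own statement) =====
-- stated objective: alternative
-- what changed: B replaces the four sequential str.replace passes with a single character-wise pass that joins each character's dict mapping (or the character itself).
import Mathlib
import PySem

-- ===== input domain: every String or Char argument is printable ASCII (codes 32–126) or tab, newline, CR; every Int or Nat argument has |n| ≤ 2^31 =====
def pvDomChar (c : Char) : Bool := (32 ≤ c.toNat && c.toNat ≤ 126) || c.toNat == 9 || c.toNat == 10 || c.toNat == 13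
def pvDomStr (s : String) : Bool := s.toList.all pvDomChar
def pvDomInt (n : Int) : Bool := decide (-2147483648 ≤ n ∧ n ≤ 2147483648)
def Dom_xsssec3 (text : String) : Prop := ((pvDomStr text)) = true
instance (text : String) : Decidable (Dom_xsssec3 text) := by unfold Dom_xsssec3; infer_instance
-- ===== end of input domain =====

-- B makes one character-wise pass with a mapping dict instead of A's four sequential replace passes (objective: alternative).

-- ===== PORT A =====
def xsssec3 (text : String) : String :=
  let subList : PySem.Dict String String :=
    PySem.Dict.ofList [("<", "＜"), (">", "＞"), ("\"", "＂"), ("'", "＇")]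
  subList.keys.foldl (fun t s => PySem.Str.replace t s ((subList.get? s).getD "")) text

-- ===== PORT B =====
def xsssec3_alt (text : String) : String :=
  let subList : PySem.Dict Char Char :=
    PySem.Dict.ofList [('<', '＜'), ('>', '＞'), ('"', '＂'), ('\'', '＇')]
  String.ofList (text.toList.map (fun c => subList.getD c c))

-- ===== PRECONDITION & SPEC =====
def Spec_xsssec3 (text : String) (out : String) : Prop := out = xsssec3_alt text
instance (text : String) (out : String) : Decidable (Spec_xsssec3 text out) := by unfold Spec_xsssec3; infer_instance

-- ===== CLAIM (what is proved, stated in full; the proofs are below) =====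
def Claim_equal_xsssec3 : Prop := ∀ (text : String), Dom_xsssec3 text → Spec_xsssec3 text (xsssec3 text)

-- ===== LEMMAS AND PROOFS =====

-- single-character str.replace is a character map
theorem replace_go_single (c d : Char) : ∀ (fuel : Nat) (l acc : List Char), l.length ≤ fuel →
    PySem.Chars.replace.go [c] [d] fuel l acc = acc.reverse ++ l.map (fun x => if x = c then d else x) := by
  intro fuel
  induction fuel with
  | zero => intro l acc h; simp at h; simp [h, PySem.Chars.replace.go]
  | succ n ih =>
    intro l acc h
    cases l with
    | nil => simp [PySem.Chars.replace.go]
    | cons c' t =>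
      simp only [PySem.Chars.replace.go]
      by_cases hc : c = c'
      · subst hc
        simp [List.isPrefixOf, ih t _ (by simpa using h)]
      · simp [List.isPrefixOf, hc, Ne.symm hc, ih t _ (by simpa using h)]

theorem replace_single (c d : Char) (s : List Char) :
    PySem.Chars.replace s [c] [d] = s.map (fun x => if x = c then d else x) := by
  simp [PySem.Chars.replace, replace_go_single c d s.length s [] le_rfl]

theorem char_map_eq (x : Char) :
    (fun y => if y = '\'' then '＇' else y)
      ((fun y => if y = '"' then '＂' else y)
        ((fun y => if y = '>' then '＞' else y)
          ((fun y => if y = '<' then '＜' else y) x)))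
      = (PySem.Dict.ofList [('<', '＜'), ('>', '＞'), ('"', '＂'), ('\'', '＇')]).getD x x := by
  have hitems : (PySem.Dict.ofList [('<', '＜'), ('>', '＞'), ('"', '＂'), ('\'', '＇')]).items
      = [('<', '＜'), ('>', '＞'), ('"', '＂'), ('\'', '＇')] := by decide
  by_cases h1 : x = '<'
  · subst h1; decide
  by_cases h2 : x = '>'
  · subst h2; decide
  by_cases h3 : x = '"'
  · subst h3; decide
  by_cases h4 : x = '\''
  · subst h4; decide
  have b1 : ('<' == x) = false := by simpa using Ne.symm h1
  have b2 : ('>' == x) = false := by simpa using Ne.symm h2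
  have b3 : ('"' == x) = false := by simpa using Ne.symm h3
  have b4 : ('\'' == x) = false := by simpa using Ne.symm h4
  simp [h1, h2, h3, h4, PySem.Dict.getD, PySem.Dict.get?, hitems, List.find?, b1, b2, b3, b4]

-- ===== VERDICT (by name: the statement is the Claim_ definition above) =====
theorem xsssec3_spec : Claim_equal_xsssec3 := by
  intro text _
  unfold Spec_xsssec3 xsssec3 xsssec3_alt
  have hkeys : (PySem.Dict.ofList [("<", "＜"), (">", "＞"), ("\"", "＂"), ("'", "＇")]).keys
      = ["<", ">", "\"", "'"] := by decide
  have hv1 : ((PySem.Dict.ofList [("<", "＜"), (">", "＞"), ("\"", "＂"), ("'", "＇")]).get? "<").getD "" = "＜" := by decide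
  have hv2 : ((PySem.Dict.ofList [("<", "＜"), (">", "＞"), ("\"", "＂"), ("'", "＇")]).get? ">").getD "" = "＞" := by decide
  have hv3 : ((PySem.Dict.ofList [("<", "＜"), (">", "＞"), ("\"", "＂"), ("'", "＇")]).get? "\"").getD "" = "＂" := by decide
  have hv4 : ((PySem.Dict.ofList [("<", "＜"), (">", "＞"), ("\"", "＂"), ("'", "＇")]).get? "'").getD "" = "＇" := by decide
  simp only [hkeys, List.foldl, hv1, hv2, hv3, hv4]
  rw [← String.toList_inj]
  simp only [PySem.Str.toList_replace, String.toList_ofList]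
  have t1 : ("<" : String).toList = ['<'] := rfl
  have t2 : (">" : String).toList = ['>'] := rfl
  have t3 : ("\"" : String).toList = ['"'] := rfl
  have t4 : ("'" : String).toList = ['\''] := rfl
  have u1 : ("＜" : String).toList = ['＜'] := rfl
  have u2 : ("＞" : String).toList = ['＞'] := rfl
  have u3 : ("＂" : String).toList = ['＂'] := rfl
  have u4 : ("＇" : String).toList = ['＇'] := rfl
  rw [t1, t2, t3, t4, u1, u2, u3, u4,
      replace_single, replace_single, replace_single, replace_single]
  simp only [List.map_map]
  exact List.map_congr_left (fun x _ => char_map_eq x)
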